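-- pv_equiv track=rewrite | github.com/petrfiedler/robot-localization | src/helpers.py | rotate_coords
-- ===== SOURCE A (Python) =====
-- def rotate_coords(coords: tuple[int, int], matrix_shape: tuple[int, int], n_times: int = 1, clockwise: bool = False) -> tuple[int, int]:
--     """
--     Rotate coordinates by 90 degrees counterclockwise n-times.
--     :param coords: Coordinates to rotate.
--     :param matrix_shape: Shape of the matrix.
--     :param n_times: Number of times to rotate.
--     :param clockwise: Rotate clockwise instead of counterclockwise.
--     :return: Rotated coordinates.
--     """
--     for _ in range(n_times):
--         if clockwise:
--             coords = (coords[1], matrix_shape[0] - coords[0] - 1)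
--         else:
--             coords = (matrix_shape[1] - coords[1] - 1, coords[0])
--
--         matrix_shape = (matrix_shape[1], matrix_shape[0])
--     return coords
-- ===== SOURCE B (Python) =====
-- def rotate_coords(coords: tuple[int, int], matrix_shape: tuple[int, int], n_times: int = 1, clockwise: bool = False) -> tuple[int, int]:
--     """Closed form: rotation by 90 degrees has period 4, so dispatch on n_times % 4."""
--     if n_times < 1:
--         return coords
--     r, c = coords
--     h, w = matrix_shape
--     n = n_times % 4
--     if clockwise:
--         if n == 0:
--             return (r, c)
--         if n == 1:
--             return (c, h - r - 1)
--         if n == 2: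
--             return (h - r - 1, w - c - 1)
--         return (w - c - 1, r)
--     else:
--         if n == 0:
--             return (r, c)
--         if n == 1:
--             return (w - c - 1, r)
--         if n == 2:
--             return (h - r - 1, w - c - 1)
--         return (c, h - r - 1)
-- ===== Notes on version B (the rewrite author's own statement) =====
-- stated objective: faster
-- what changed: Replaces the n_times-iteration loop (which also reswaps the matrix shape each step) with a loopless closed form: rotation has period 4, so B returns coords unchanged for n_times < 1 and otherwise dispatches on n_times % 4 with the four unrolled rotation formulas.
import Mathlib
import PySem

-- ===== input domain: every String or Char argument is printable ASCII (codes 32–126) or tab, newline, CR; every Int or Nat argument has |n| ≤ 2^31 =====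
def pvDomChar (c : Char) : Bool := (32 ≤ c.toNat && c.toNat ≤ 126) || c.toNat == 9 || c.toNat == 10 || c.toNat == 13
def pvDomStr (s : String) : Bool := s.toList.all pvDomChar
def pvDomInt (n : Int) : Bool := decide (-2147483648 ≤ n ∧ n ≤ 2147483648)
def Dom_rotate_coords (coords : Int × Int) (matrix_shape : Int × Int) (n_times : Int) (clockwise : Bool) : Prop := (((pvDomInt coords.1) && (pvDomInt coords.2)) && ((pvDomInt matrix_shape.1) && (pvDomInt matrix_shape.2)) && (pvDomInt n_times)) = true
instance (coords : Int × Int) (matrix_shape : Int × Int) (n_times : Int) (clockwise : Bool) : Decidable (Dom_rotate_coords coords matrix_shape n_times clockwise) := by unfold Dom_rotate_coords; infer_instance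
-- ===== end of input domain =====

-- B replaces A's n_times rotation loop with an O(1) closed form dispatching on n_times % 4 (faster).


-- ===== PORT A =====
-- A's loop body: transform coords and swap the shape, once per iteration of range(n_times).
def rotLoop (clockwise : Bool) : Nat → (Int × Int) → (Int × Int) → (Int × Int)
  | 0, coords, _ => coords
  | k+1, coords, shape =>
      rotLoop clockwise k
        (if clockwise then (coords.2, shape.1 - coords.1 - 1)
         else (shape.2 - coords.2 - 1, coords.1))
        (shape.2, shape.1)

def rotate_coords (coords : Int × Int) (matrix_shape : Int × Int) (n_times : Int) (clockwise : Bool) : Int × Int :=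
  rotLoop clockwise n_times.toNat coords matrix_shape

-- ===== PORT B =====
def rotate_coords_alt (coords : Int × Int) (matrix_shape : Int × Int) (n_times : Int) (clockwise : Bool) : Int × Int :=
  if n_times < 1 then coords
  else
    let r := coords.1; let c := coords.2
    let h := matrix_shape.1; let w := matrix_shape.2
    let n := PySem.Int.mod n_times 4
    if clockwise then
      if n = 0 then (r, c)
      else if n = 1 then (c, h - r - 1)
      else if n = 2 then (h - r - 1, w - c - 1)
      else (w - c - 1, r)
    else
      if n = 0 then (r, c)
      else if n = 1 then (w - c - 1, r)
      else if n = 2 then (h - r - 1, w - c - 1)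
      else (c, h - r - 1)

-- ===== PRECONDITION & SPEC =====
def Spec_rotate_coords (coords : Int × Int) (matrix_shape : Int × Int) (n_times : Int) (clockwise : Bool) (out : Int × Int) : Prop := out = rotate_coords_alt coords matrix_shape n_times clockwise
instance (coords : Int × Int) (matrix_shape : Int × Int) (n_times : Int) (clockwise : Bool) (out : Int × Int) : Decidable (Spec_rotate_coords coords matrix_shape n_times clockwise out) := by unfold Spec_rotate_coords; infer_instance

-- ===== CLAIM (what is proved, stated in full; the proofs are below) =====
def Claim_equal_rotate_coords : Prop := ∀ (coords : Int × Int) (matrix_shape : Int × Int) (n_times : Int) (clockwise : Bool), Dom_rotate_coords coords matrix_shape n_times clockwise → Spec_rotate_coords coords matrix_shape n_times clockwise (rotate_coords coords matrix_shape n_times clockwise)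

-- ===== LEMMAS AND PROOFS =====

-- rotating four times is the identity on both coords and shape
theorem rotLoop_four (cw : Bool) (k : Nat) (co sh : Int × Int) :
    rotLoop cw (k + 4) co sh = rotLoop cw k co sh := by
  obtain ⟨r, c⟩ := co; obtain ⟨h, w⟩ := sh
  cases cw <;> simp [rotLoop] <;> ring_nf

theorem rotLoop_mod (cw : Bool) (k : Nat) (co sh : Int × Int) :
    rotLoop cw k co sh = rotLoop cw (k % 4) co sh := by
  induction k using Nat.strong_induction_on with
  | _ k ih =>
    by_cases hk : k < 4
    · rw [Nat.mod_eq_of_lt hk]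
    · have h4 : k - 4 + 4 = k := by omega
      have := rotLoop_four cw (k - 4) co sh
      rw [h4] at this
      rw [this, ih (k - 4) (by omega)]
      congr 1
      omega

-- ===== VERDICT (by name: the statement is the Claim_ definition above) =====
theorem rotate_coords_spec : Claim_equal_rotate_coords := by
  intro co sh n cw _
  unfold Spec_rotate_coords rotate_coords rotate_coords_alt
  by_cases hn : n < 1
  · have : n.toNat = 0 := by omega
    simp [this, rotLoop, hn]
  · simp only [if_neg hn]
    rw [rotLoop_mod]
    have hm : PySem.Int.mod n 4 = ((n.toNat % 4 : Nat) : Int) := by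
      rw [PySem.Int.mod_eq_emod_of_pos (by norm_num)]
      omega
    rw [hm]
    have h4 : n.toNat % 4 < 4 := by omega
    obtain ⟨r, c⟩ := co; obtain ⟨h, w⟩ := sh
    interval_cases (n.toNat % 4) <;> cases cw <;> simp [rotLoop] <;> omega
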